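-- pv_equiv track=rewrite | github.com/brian-dlee/bootdev-static-site-generator | src/md.py | extract_unordered_list_items
-- ===== SOURCE A (Python) =====
-- def extract_unordered_list_items(block):
--     elements = []
--     for line in block.split("\n"):
--         if line.startswith("- ") or line.startswith("* "):
--             elements.append(line[2:].strip())
--         elif len(elements) > 0:
--             elements[-1] += " " + line.strip()
--     return elements
-- ===== SOURCE B (Python) =====
-- def _is_item(line):
--     return line.startswith("- ") or line.startswith("* ")
--
--
-- def _skip(lines, i):
--     while i < len(lines) and not _is_item(lines[i]):
--         i += 1
--     return i
--
--
-- def extract_unordered_list_items(block):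
--     lines = block.split("\n")
--     i = _skip(lines, 0)
--     items = []
--     while i < len(lines):
--         j = _skip(lines, i + 1)
--         items.append(lines[i][2:].strip() + "".join(" " + c.strip() for c in lines[i + 1:j]))
--         i = j
--     return items
-- ===== Notes on version B (the rewrite author's own statement) =====
-- stated objective: alternative
-- what changed: Replaces A's single pass that mutates the last accumulated element on each continuation line by an index-based two-level scan: a skip helper finds the next marker position, and each item is formatted in one step from its marker line plus the slice of continuation lines up to the next marker.
import Mathlib
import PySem

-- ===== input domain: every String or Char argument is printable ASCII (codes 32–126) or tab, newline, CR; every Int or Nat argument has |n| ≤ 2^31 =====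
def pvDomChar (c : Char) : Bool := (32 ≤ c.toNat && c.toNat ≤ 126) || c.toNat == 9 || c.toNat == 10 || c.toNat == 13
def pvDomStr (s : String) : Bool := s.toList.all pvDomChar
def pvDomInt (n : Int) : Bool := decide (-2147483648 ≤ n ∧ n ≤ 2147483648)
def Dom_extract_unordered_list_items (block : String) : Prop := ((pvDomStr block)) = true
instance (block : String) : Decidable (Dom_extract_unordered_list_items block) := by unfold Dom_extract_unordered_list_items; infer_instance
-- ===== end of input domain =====

-- B replaces A's single accumulator loop (which mutates the last element on continuation
-- lines) by an index-based two-level scan: find marker positions with a skip helper and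
-- format each marker line together with its continuation slice; objective: alternative.
-- Strings are handled as code-point lists (PySem.Chars, exact on the stated domain).

-- ===== PORT A =====
-- the loop body of A's single for-loop ('if marker: append; elif elements: elements[-1] += …')
def pvStepA (elements : List (List Char)) (line : List Char) : List (List Char) :=
  if PySem.Chars.startswith line ['-', ' '] || PySem.Chars.startswith line ['*', ' '] then
    elements ++ [PySem.Chars.strip (PySem.Chars.slice line (some 2) none)]
  else if elements.length > 0 then
    elements.dropLast ++ [elements.getLastD [] ++ (' ' :: PySem.Chars.strip line)]
  else elements

def extract_unordered_list_items (block : String) : List String :=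
  (((PySem.Chars.splitOn block.toList ['\n']).foldl pvStepA ([] : List (List Char)))).map String.ofList

-- ===== PORT B =====
def pvIsItem (line : List Char) : Bool :=
  PySem.Chars.startswith line ['-', ' '] || PySem.Chars.startswith line ['*', ' ']

-- _skip: advance i past non-marker lines
def pvSkip (lines : List (List Char)) (i : Nat) : Nat :=
  if i < lines.length ∧ ¬ pvIsItem (lines.getD i []) then pvSkip lines (i + 1) else i
termination_by lines.length - i
decreasing_by omega

theorem pvSkip_ge (lines : List (List Char)) (i : Nat) : i ≤ pvSkip lines i := by
  unfold pvSkip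
  split
  · have := pvSkip_ge lines (i + 1); omega
  · omega
termination_by lines.length - i
decreasing_by omega

-- the main while-loop of B: format lines[i] with its continuation slice lines[i+1:j]
def pvItems (lines : List (List Char)) (i : Nat) : List (List Char) :=
  if i < lines.length then
    (PySem.Chars.strip (PySem.Chars.slice (lines.getD i []) (some 2) none)
       ++ PySem.Chars.join []
            ((PySem.List.slice lines (some ((i + 1 : Nat) : Int)) (some ((pvSkip lines (i + 1) : Nat) : Int))).map
              (fun c => ' ' :: PySem.Chars.strip c)))
    :: pvItems lines (pvSkip lines (i + 1))
  else []
termination_by lines.length - i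
decreasing_by have := pvSkip_ge lines (i + 1); omega

def extract_unordered_list_items_alt (block : String) : List String :=
  (pvItems (PySem.Chars.splitOn block.toList ['\n'])
    (pvSkip (PySem.Chars.splitOn block.toList ['\n']) 0)).map String.ofList

-- ===== PRECONDITION & SPEC =====
def Spec_extract_unordered_list_items (block : String) (out : List String) : Prop := out = extract_unordered_list_items_alt block
instance (block : String) (out : List String) : Decidable (Spec_extract_unordered_list_items block out) := by unfold Spec_extract_unordered_list_items; infer_instance

-- ===== CLAIM (what is proved, stated in full; the proofs are below) =====
def Claim_equal_extract_unordered_list_items : Prop := ∀ (block : String), Dom_extract_unordered_list_items block → Spec_extract_unordered_list_items block (extract_unordered_list_items block)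

-- ===== LEMMAS AND PROOFS =====

-- continuation predicate: a line that is NOT a marker line
def pvNm (l : List Char) : Bool := ! pvIsItem l

-- formatted first line of an item
def pvFmt (h : List Char) : List Char := PySem.Chars.strip (PySem.Chars.slice h (some 2) none)

-- '"".join(" " + c.strip() for c in cont)'
def pvJc (cs : List (List Char)) : List Char :=
  PySem.Chars.join [] (cs.map (fun c => ' ' :: PySem.Chars.strip c))

-- reference structural parser both ports are reduced to
def pvParse : List (List Char) → List (List Char)
  | [] => []
  | h :: t => (pvFmt h ++ pvJc (t.takeWhile pvNm)) :: pvParse (t.dropWhile pvNm)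
termination_by l => l.length
decreasing_by simp_wf; have := List.length_dropWhile_le pvNm t; omega

def pvConsume (x : List Char) (t : List (List Char)) : List (List Char) :=
  (x ++ pvJc (t.takeWhile pvNm)) :: pvParse (t.dropWhile pvNm)

theorem pvJoinNil (l : List (List Char)) : PySem.Chars.join [] l = l.flatten := by
  simp [PySem.Chars.join, List.intercalate]
  induction l with
  | nil => rfl
  | cons a r ih => cases r <;> simp_all [List.intersperse]

theorem pvJc_cons (c : List Char) (cs : List (List Char)) :
    pvJc (c :: cs) = (' ' :: PySem.Chars.strip c) ++ pvJc cs := by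
  simp [pvJc, pvJoinNil]

theorem pvDropWhile_eq_drop (p : List Char → Bool) (l : List (List Char)) :
    l.dropWhile p = l.drop (l.takeWhile p).length := by
  induction l with
  | nil => rfl
  | cons h t ih => by_cases hp : p h <;> simp [hp, ih]

theorem pvTake_takeWhile (p : List Char → Bool) (l : List (List Char)) :
    l.take (l.takeWhile p).length = l.takeWhile p :=
  ((List.prefix_iff_eq_take).mp (List.takeWhile_prefix p)).symm

-- A's loop with a nonempty accumulator appends pvConsume of the pending item
theorem pvFoldl_consume (t : List (List Char)) :
    ∀ (acc : List (List Char)) (x : List Char),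
      t.foldl pvStepA (acc ++ [x]) = acc ++ pvConsume x t := by
  induction t with
  | nil =>
    intro acc x
    simp [pvConsume, pvParse, pvJc, PySem.Chars.join, List.intercalate]
  | cons l t ih =>
    intro acc x
    by_cases hm : pvIsItem l = true
    · have hstep : pvStepA (acc ++ [x]) l
          = (acc ++ [x]) ++ [pvFmt l] := by
        unfold pvStepA pvFmt
        rw [if_pos (by simpa [pvIsItem] using hm)]
      have hnm : pvNm l = false := by simp [pvNm, hm]
      calc (l :: t).foldl pvStepA (acc ++ [x])
          = t.foldl pvStepA ((acc ++ [x]) ++ [pvFmt l]) := by rw [List.foldl_cons, hstep]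
        _ = (acc ++ [x]) ++ pvConsume (pvFmt l) t := ih _ _
        _ = acc ++ pvConsume x (l :: t) := by
              simp [pvConsume, hnm, pvParse, pvJc, PySem.Chars.join, List.intercalate]
    · have hm' : pvIsItem l = false := by simpa using hm
      have hstep : pvStepA (acc ++ [x]) l
          = acc ++ [x ++ (' ' :: PySem.Chars.strip l)] := by
        unfold pvStepA
        rw [if_neg (by simpa [pvIsItem] using hm'), if_pos (by simp)]
        simp
      have hnm : pvNm l = true := by simp [pvNm, hm']
      calc (l :: t).foldl pvStepA (acc ++ [x])
          = t.foldl pvStepA (acc ++ [x ++ (' ' :: PySem.Chars.strip l)]) := by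
            rw [List.foldl_cons, hstep]
        _ = acc ++ pvConsume (x ++ (' ' :: PySem.Chars.strip l)) t := ih _ _
        _ = acc ++ pvConsume x (l :: t) := by
              simp [pvConsume, hnm, pvJc_cons]

-- A's whole loop parses the lines after the pre-marker prefix
theorem pvFoldl_eq_parse (lines : List (List Char)) :
    lines.foldl pvStepA [] = pvParse (lines.dropWhile pvNm) := by
  induction lines with
  | nil => simp [pvParse]
  | cons l t ih =>
    by_cases hm : pvIsItem l = true
    · have hstep : pvStepA [] l = [] ++ [pvFmt l] := by
        unfold pvStepA pvFmt
        rw [if_pos (by simpa [pvIsItem] using hm)]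
      have hnm : pvNm l = false := by simp [pvNm, hm]
      rw [List.foldl_cons, hstep, pvFoldl_consume, List.dropWhile_cons]
      simp [hnm, pvParse, pvConsume]
    · have hm' : pvIsItem l = false := by simpa using hm
      have hstep : pvStepA [] l = [] := by
        unfold pvStepA
        rw [if_neg (by simpa [pvIsItem] using hm'), if_neg (by simp)]
      have hnm : pvNm l = true := by simp [pvNm, hm']
      rw [List.foldl_cons, hstep, List.dropWhile_cons]
      simp [hnm, ih]

-- pvSkip counts the continuation lines from i
theorem pvSkip_eq (lines : List (List Char)) (i : Nat) :
    pvSkip lines i = i + ((lines.drop i).takeWhile pvNm).length := by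
  by_cases h : i < lines.length
  · have hdrop : lines.drop i = lines[i] :: lines.drop (i + 1) := List.drop_eq_getElem_cons h
    have hget? : lines[i]? = some lines[i] := List.getElem?_eq_getElem h
    by_cases hm : pvIsItem lines[i] = true
    · have hnm : pvNm lines[i] = false := by simp [pvNm, hm]
      rw [pvSkip, if_neg (by simp [List.getD, hget?, hm]), hdrop]
      simp [hnm]
    · have hm' : pvIsItem lines[i] = false := by simpa using hm
      have hnm : pvNm lines[i] = true := by simp [pvNm, hm']
      rw [pvSkip, if_pos ⟨h, by simp [List.getD, hget?, hm']⟩, pvSkip_eq lines (i + 1), hdrop]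
      rw [List.takeWhile_cons, if_pos hnm]
      simp
      omega
  · rw [pvSkip, if_neg (by omega)]
    simp [List.drop_eq_nil_of_le (by omega : lines.length ≤ i)]
termination_by lines.length - i
decreasing_by omega

-- B's item loop is pvParse of the remaining lines
theorem pvItems_eq_parse (lines : List (List Char)) (i : Nat) :
    pvItems lines i = pvParse (lines.drop i) := by
  by_cases h : i < lines.length
  · have hdrop : lines.drop i = lines[i] :: lines.drop (i + 1) := List.drop_eq_getElem_cons h
    have hget? : lines[i]? = some lines[i] := List.getElem?_eq_getElem h
    have hskip := pvSkip_eq lines (i + 1)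
    have hge := pvSkip_ge lines (i + 1)
    have hslice : PySem.List.slice lines (some ((i + 1 : Nat) : Int))
        (some ((pvSkip lines (i + 1) : Nat) : Int))
        = (lines.drop (i + 1)).takeWhile pvNm := by
      rw [PySem.List.slice_natCast]
      rw [hskip]
      have : i + 1 + ((lines.drop (i + 1)).takeWhile pvNm).length - (i + 1)
          = ((lines.drop (i + 1)).takeWhile pvNm).length := by omega
      rw [this, pvTake_takeWhile]
    have hdropj : lines.drop (pvSkip lines (i + 1))
        = (lines.drop (i + 1)).dropWhile pvNm := by
      rw [hskip, pvDropWhile_eq_drop, ← List.drop_drop]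
    rw [pvItems, if_pos h,
      pvItems_eq_parse lines (pvSkip lines (i + 1)), hslice, hdropj, hdrop, pvParse]
    simp [pvFmt, pvJc, List.getD, hget?]
  · rw [pvItems, if_neg h]
    simp [List.drop_eq_nil_of_le (by omega : lines.length ≤ i), pvParse]
termination_by lines.length - i
decreasing_by have := pvSkip_ge lines (i + 1); omega

-- ===== VERDICT (by name: the statement is the Claim_ definition above) =====
theorem extract_unordered_list_items_spec : Claim_equal_extract_unordered_list_items := by
  intro block _
  unfold Spec_extract_unordered_list_items extract_unordered_list_items extract_unordered_list_items_alt
  rw [pvFoldl_eq_parse, pvItems_eq_parse, pvSkip_eq]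
  simp [pvDropWhile_eq_drop]
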